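-- pv_equiv track=rewrite | github.com/maxgesteland/cs5350 | DecisionTree/decisionTree.py | detect_numerical_attributes
-- ===== SOURCE A (Python) =====
-- def detect_numerical_attributes(attributes):
--     columns = list(zip(*attributes))
--     numerical_indices = []
--     for i, column in enumerate(columns):
--         is_numerical = True
--         for value in column:
--             try:
--                 float(value)
--             except ValueError:
--                 is_numerical = False
--                 break
--         if is_numerical:
--             numerical_indices.append(i)
--
--     return numerical_indices
-- ===== SOURCE B (Python) =====
-- def detect_numerical_attributes(attributes):
--     # Row-major shrinking-candidate-set scan instead of zip-transpose + per-column scan.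
--     if not attributes:
--         return []
--     candidates = list(range(min(len(row) for row in attributes)))
--     for row in attributes:
--         keep = []
--         for i in candidates:
--             try:
--                 float(row[i])
--                 keep.append(i)
--             except ValueError:
--                 pass
--         candidates = keep
--     return candidates
-- ===== Notes on version B (the rewrite author's own statement) =====
-- stated objective: alternative
-- what changed: Replaces the zip-transpose plus per-column inner scan with a row-major pass that maintains a shrinking list of still-numeric candidate column indices, dropping an index the first time its value fails to parse as a float.
import Mathlib
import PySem

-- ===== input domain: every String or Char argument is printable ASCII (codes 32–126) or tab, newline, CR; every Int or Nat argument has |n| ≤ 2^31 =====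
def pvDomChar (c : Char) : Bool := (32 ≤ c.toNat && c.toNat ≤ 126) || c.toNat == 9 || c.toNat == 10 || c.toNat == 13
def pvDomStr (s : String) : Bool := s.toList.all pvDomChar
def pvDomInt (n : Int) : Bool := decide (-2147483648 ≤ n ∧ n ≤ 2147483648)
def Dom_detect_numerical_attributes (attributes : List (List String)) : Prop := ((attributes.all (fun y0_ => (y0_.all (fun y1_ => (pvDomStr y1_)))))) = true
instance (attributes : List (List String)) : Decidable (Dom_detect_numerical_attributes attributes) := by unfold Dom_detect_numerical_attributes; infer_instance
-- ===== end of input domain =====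

-- B replaces A's zip-transpose + per-column scan with a row-major pass over a shrinking
-- candidate list of column indices (objective: alternative decomposition, same cost).

def pvIsSpace (c : Char) : Bool :=
  c = ' ' || c = '\t' || c = '\n' || c = '\r' || c = '\x0b' || c = '\x0c'

-- ===== PORT A =====
-- Hand port of CPython's float() string acceptance (does `float(value)` raise ValueError?),
-- exact on ASCII input: strip whitespace, optional sign, then inf/infinity/nan
-- (case-insensitive) or a float literal with single underscores between digits.
def pvDigitsCont : List Char → List Char
  | [] => []
  | [c] => if c.isDigit then [] else [c]
  | c :: d :: rest =>
    if c.isDigit then pvDigitsCont (d :: rest)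
    else if c = '_' ∧ d.isDigit then pvDigitsCont rest
    else c :: d :: rest
termination_by l => l.length

-- consumes `digit (('_')? digit)*`; none if no leading digit
def pvDigits : List Char → Option (List Char)
  | [] => none
  | c :: rest => if c.isDigit then some (pvDigitsCont rest) else none

-- after the mantissa: end of string, or exponent 'e' [sign] digits (input lowercased)
def pvExpOk : List Char → Bool
  | [] => true
  | 'e' :: r =>
    let r' := match r with | '+' :: t => t | '-' :: t => t | _ => r
    match pvDigits r' with | some [] => true | _ => false
  | _ => false

def pvNumberOk (cs : List Char) : Bool :=
  match pvDigits cs with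
  | some rest1 =>
    let rest2 := match rest1 with
      | '.' :: r => (match pvDigits r with | some r' => r' | none => r)
      | _ => rest1
    pvExpOk rest2
  | none =>
    match cs with
    | '.' :: r => (match pvDigits r with | some rest2 => pvExpOk rest2 | none => false)
    | _ => false

def isPyFloat (s : String) : Bool :=
  let cs := (((s.toList.dropWhile pvIsSpace).reverse.dropWhile pvIsSpace).reverse).map Char.toLower
  let cs1 := match cs with | '+' :: t => t | '-' :: t => t | _ => cs
  if cs1 = ['i','n','f'] || cs1 = ['i','n','f','i','n','i','t','y'] || cs1 = ['n','a','n'] then true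
  else pvNumberOk cs1

-- zip(*attributes): column-major transpose truncated to the shortest row
def pyZipStar (rows : List (List String)) : List (List String) :=
  if h : rows ≠ [] ∧ ∀ r ∈ rows, r ≠ [] then
    rows.map (fun r => r.headD "") :: pyZipStar (rows.map List.tail)
  else []
termination_by (rows.headD []).length
decreasing_by
  obtain ⟨h1, h2⟩ := h
  cases rows with
  | nil => exact absurd rfl h1
  | cons a t =>
    have ha : a ≠ [] := h2 a (List.mem_cons_self)
    have hl : 0 < a.length := List.length_pos_iff.mpr ha
    simp
    omega

-- the inner `for value in column: try float … except ValueError: break`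
def pvCheckCol : List String → Bool
  | [] => true
  | v :: vs => if isPyFloat v then pvCheckCol vs else false

def detect_numerical_attributes (attributes : List (List String)) : List Int :=
  let columns := pyZipStar attributes
  (PySem.List.enumerate columns).foldl
    (fun acc ic => if pvCheckCol ic.2 then acc ++ [ic.1] else acc) []

-- ===== PORT B =====
-- B's own hand port of float() acceptance: instead of A's sequential consumer it SPLITS the
-- (stripped, lowercased, unsigned) literal at the first 'e' and first '.', and checks each
-- piece declaratively as an underscore-separated digit run; exact on ASCII input.
def splitFirst (t : Char) : List Char → List Char × Option (List Char)
  | [] => ([], none)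
  | c :: cs =>
    if c = t then ([], some cs)
    else
      let p := splitFirst t cs
      (c :: p.1, p.2)

-- a digit run `digit (('_')? digit)*`, stated declaratively
def digitsB (l : List Char) : Bool :=
  !l.isEmpty && (l.headD '_').isDigit && (l.getLastD '_').isDigit
    && l.all (fun c => c.isDigit || c = '_')
    && (l.zip l.tail).all (fun p => !(p.1 = '_' : Bool) || p.2.isDigit)

def signDrop (l : List Char) : List Char :=
  match l with | '+' :: t => t | '-' :: t => t | _ => l

def mantB (m : List Char) : Bool :=
  match splitFirst '.' m with
  | (ip, none) => digitsB ip
  | (ip, some fp) =>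
    if ip.isEmpty then digitsB fp
    else digitsB ip && (fp.isEmpty || digitsB fp)

def expB : Option (List Char) → Bool
  | none => true
  | some ex => digitsB (signDrop ex)

def numB (cs : List Char) : Bool :=
  let me := splitFirst 'e' cs
  mantB me.1 && expB me.2

def isPyFloatB (s : String) : Bool :=
  let cs := (((s.toList.dropWhile pvIsSpace).reverse.dropWhile pvIsSpace).reverse).map Char.toLower
  let cs1 := signDrop cs
  if cs1 = ['i','n','f'] || cs1 = ['i','n','f','i','n','i','t','y'] || cs1 = ['n','a','n'] then true
  else numB cs1

-- min(len(row) for row in attributes)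
def minRowLen : List (List String) → Nat → Nat
  | [], acc => acc
  | r :: rs, acc => minRowLen rs (Nat.min acc r.length)

-- for i in candidates: keep i iff float(row[i]) succeeds (row[i] in range by construction)
def surviveRow (row : List String) : List Int → List Int
  | [] => []
  | i :: is =>
    if isPyFloatB (row.getD i.toNat "") then i :: surviveRow row is
    else surviveRow row is

def runRows : List (List String) → List Int → List Int
  | [], cands => cands
  | row :: rs, cands => runRows rs (surviveRow row cands)

def detect_numerical_attributes_alt (attributes : List (List String)) : List Int :=
  match attributes with
  | [] => []
  | r0 :: rest =>
    runRows (r0 :: rest) ((List.range (minRowLen rest r0.length)).map Int.ofNat)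

-- ===== PRECONDITION & SPEC =====
def Spec_detect_numerical_attributes (attributes : List (List String)) (out : List Int) : Prop := out = detect_numerical_attributes_alt attributes
instance (attributes : List (List String)) (out : List Int) : Decidable (Spec_detect_numerical_attributes attributes out) := by unfold Spec_detect_numerical_attributes; infer_instance

-- ===== CLAIM (what is proved, stated in full; the proofs are below) =====
def Claim_equal_detect_numerical_attributes : Prop := ∀ (attributes : List (List String)), Dom_detect_numerical_attributes attributes → Spec_detect_numerical_attributes attributes (detect_numerical_attributes attributes)

-- ===== LEMMAS AND PROOFS =====

-- min row length (matches B's minRowLen and zip's truncation)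
def pvMinLen : List (List String) → Nat
  | [] => 0
  | r :: rest => rest.foldl (fun a r' => Nat.min a r'.length) r.length

lemma pvMinLen_tail (rest : List (List String)) (a : Nat)
    (h : ∀ r ∈ rest, r ≠ []) :
    (rest.map List.tail).foldl (fun acc r => Nat.min acc r.length) (a - 1)
      = rest.foldl (fun acc r => Nat.min acc r.length) a - 1 := by
  induction rest generalizing a with
  | nil => rfl
  | cons r rs ih =>
    have hr : r ≠ [] := h r List.mem_cons_self
    have hlen : 0 < r.length := List.length_pos_iff.mpr hr
    simp only [List.map_cons, List.foldl_cons, List.length_tail]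
    rw [show Nat.min (a - 1) (r.length - 1) = Nat.min a r.length - 1 from Nat.sub_min_sub_right a r.length 1]
    exact ih _ (fun x hx => h x (List.mem_cons_of_mem _ hx))

lemma pvMinLen_pos (rows : List (List String)) (h1 : rows ≠ [])
    (h2 : ∀ r ∈ rows, r ≠ []) : 0 < pvMinLen rows := by
  cases rows with
  | nil => exact absurd rfl h1
  | cons r rs =>
    have : ∀ (l : List (List String)) (a : Nat), 0 < a → (∀ x ∈ l, x ≠ []) →
        0 < l.foldl (fun acc r' => Nat.min acc r'.length) a := by
      intro l
      induction l with
      | nil => intro a ha _; exact ha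
      | cons x xs ih =>
        intro a ha hx
        simp only [List.foldl_cons]
        refine ih _ ?_ (fun y hy => hx y (List.mem_cons_of_mem _ hy))
        exact Nat.lt_min.mpr ⟨ha, List.length_pos_iff.mpr (hx x List.mem_cons_self)⟩
    exact this rs r.length (List.length_pos_iff.mpr (h2 r List.mem_cons_self)) (fun x hx => h2 x (List.mem_cons_of_mem _ hx))

lemma foldl_min_le_init (l : List (List String)) (a : Nat) :
    l.foldl (fun acc r => Nat.min acc r.length) a ≤ a := by
  induction l generalizing a with
  | nil => exact Nat.le_refl a
  | cons x xs ih =>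
    exact Nat.le_trans (ih (Nat.min a x.length)) (Nat.min_le_left _ _)

lemma foldl_min_le_mem (l : List (List String)) (a : Nat) (x : List String)
    (hx : x ∈ l) : l.foldl (fun acc r => Nat.min acc r.length) a ≤ x.length := by
  induction l generalizing a with
  | nil => cases hx
  | cons y ys ih =>
    rcases List.mem_cons.mp hx with h' | h'
    · subst h'
      exact Nat.le_trans (foldl_min_le_init ys _) (Nat.min_le_right _ _)
    · exact ih _ h'

lemma pvMinLen_zero (rows : List (List String)) (h : ∃ r ∈ rows, r = []) :
    pvMinLen rows = 0 := by
  obtain ⟨x, hx, hxe⟩ := h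
  cases rows with
  | nil => rfl
  | cons r rs =>
    have hle : pvMinLen (r :: rs) ≤ x.length := by
      rcases List.mem_cons.mp hx with h' | h'
      · subst h'; exact foldl_min_le_init rs x.length
      · exact foldl_min_le_mem rs r.length x h'
    simpa [hxe] using Nat.le_zero.mp (by simpa [hxe] using hle)

lemma getD_tail {α : Type} [Inhabited α] (l : List α) (j : Nat) (d : α) :
    l.tail.getD j d = l.getD (j + 1) d := by
  cases l <;> simp [List.getD]

lemma pyZipStar_eq (rows : List (List String)) :
    pyZipStar rows
      = (List.range (pvMinLen rows)).map (fun j => rows.map (fun r => r.getD j "")) := by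
  rw [pyZipStar]
  split
  case isTrue h =>
    obtain ⟨h1, h2⟩ := h
    have hpos := pvMinLen_pos rows h1 h2
    have htail : pvMinLen (rows.map List.tail) = pvMinLen rows - 1 := by
      cases rows with
      | nil => exact absurd rfl h1
      | cons r rs =>
        simpa [pvMinLen] using pvMinLen_tail rs r.length (fun x hx => h2 x (List.mem_cons_of_mem _ hx))
    obtain ⟨k, hk⟩ : ∃ k, pvMinLen rows = k + 1 := ⟨pvMinLen rows - 1, by omega⟩
    have ih := pyZipStar_eq (rows.map List.tail)
    rw [ih, htail, hk]
    simp only [Nat.add_sub_cancel, List.range_succ_eq_map, List.map_cons, List.map_map]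
    congr 1
    · apply List.map_congr_left
      intro r hr
      cases r with
      | nil => exact absurd rfl (h2 _ hr)
      | cons a t => simp [List.getD]
    · apply List.map_congr_left
      intro j _
      simp only [Function.comp, List.map_map]
      apply List.map_congr_left
      intro r _
      exact getD_tail r j ""
  case isFalse h =>
    by_cases h1 : rows = []
    · subst h1; simp [pvMinLen]
    · have h2 : ∃ r ∈ rows, r = [] := by
        by_contra hc
        exact h ⟨h1, fun r hr hre => hc ⟨r, hr, hre⟩⟩
      rw [pvMinLen_zero rows h2]
      simp
termination_by (rows.headD []).length
decreasing_by
  cases rows with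
  | nil => exact absurd rfl h1
  | cons a t =>
    have ha : a ≠ [] := h2 a (List.mem_cons_self)
    have hl : 0 < a.length := List.length_pos_iff.mpr ha
    simp
    omega

lemma pvCheckCol_eq_all (l : List String) : pvCheckCol l = l.all isPyFloat := by
  induction l with
  | nil => rfl
  | cons v vs ih => by_cases h : isPyFloat v <;> simp [pvCheckCol, h, ih]

-- A's result as a filtered index range
lemma portA_eq (rows : List (List String)) :
    detect_numerical_attributes rows
      = ((List.range (pvMinLen rows)).filter
          (fun j => rows.all (fun r => isPyFloat (r.getD j "")))).map Int.ofNat := by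
  unfold detect_numerical_attributes
  rw [pyZipStar_eq]
  have : ∀ (js : List Nat) (s : Int) (acc : List Int),
      (PySem.List.enumerate (js.map (fun j => rows.map (fun r => r.getD j ""))) s).foldl
        (fun acc ic => if pvCheckCol ic.2 then acc ++ [ic.1] else acc) acc
      = acc ++ ((List.zip (PySem.List.pyRange s (s + js.length) 1) js).filter
          (fun p => rows.all (fun r => isPyFloat (r.getD p.2 "")))).map (·.1) := by
    intro js
    induction js with
    | nil => intro s acc; simp [PySem.List.enumerate_nil]
    | cons j js ih =>
      intro s acc
      simp only [List.map_cons, PySem.List.enumerate_cons, List.foldl_cons, List.length_cons]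
      rw [PySem.List.pyRange_one_cons (by omega)]
      have hcc : pvCheckCol (rows.map (fun r => r.getD j "")) = rows.all (fun r => isPyFloat (r.getD j "")) := by
        rw [pvCheckCol_eq_all, List.all_map]; rfl
      by_cases hp : rows.all (fun r => isPyFloat (r.getD j "")) = true
      · rw [if_pos (by rw [hcc]; exact hp), ih (s + 1)]
        simp only [List.zip_cons_cons, List.filter_cons, hp]
        simp [show s + 1 + (js.length : Int) = s + (js.length + 1 : Nat) by push_cast; ring]
      · rw [if_neg (by rw [hcc]; exact hp), ih (s + 1)]
        simp only [List.zip_cons_cons, List.filter_cons, Bool.not_eq_true (rows.all _) ▸ hp]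
        simp only [Bool.false_eq_true] at hp
        simp [hp, show s + 1 + (js.length : Int) = s + (js.length + 1 : Nat) by push_cast; ring]
  rw [this (List.range (pvMinLen rows)) 0 []]
  simp only [List.nil_append, List.length_range]
  have hz : ∀ n : Nat, List.zip (PySem.List.pyRange 0 (0 + (n:Int)) 1) (List.range n)
      = (List.range n).map (fun j : Nat => (Int.ofNat j, j)) := by
    intro n
    apply List.ext_getElem
    · simp [PySem.List.length_pyRange_one]
    · intro k h1 h2
      simp only [List.getElem_zip, List.getElem_map, List.getElem_range]
      have hk : k < n := by simpa using h2
      congr 1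
      have := PySem.List.getElem_pyRange_one 0 (0 + (n:Int)) k
        (by simpa [PySem.List.length_pyRange_one] using h1)
      simpa using this
  rw [hz]
  rw [List.filter_map, List.map_map]
  rfl

-- proof-only machinery: characterisation of A's digit-run consumer vs B's declarative checks
def pvContOk : List Char → Bool
  | [] => true
  | [c] => c.isDigit
  | c :: d :: r => if c.isDigit then pvContOk (d :: r) else (c = '_' && d.isDigit && pvContOk r)
termination_by l => l.length

def pvNotCont : List Char → Bool
  | [] => true
  | [c] => !c.isDigit
  | c :: d :: _ => !c.isDigit && !(c = '_' && d.isDigit)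

lemma pvNotCont_head (c : Char) (t : List Char)
    (h : pvNotCont (c :: t) = true) : c.isDigit = false := by
  cases t <;> simp [pvNotCont] at h
  · simpa using h
  · simpa using h.1

lemma pvDigitsCont_stop (v : List Char) (h : pvNotCont v = true) : pvDigitsCont v = v := by
  match v with
  | [] => simp [pvDigitsCont]
  | [c] =>
    simp [pvNotCont] at h
    simp [pvDigitsCont, h]
  | c :: d :: r =>
    simp [pvNotCont] at h
    obtain ⟨h1, h2⟩ := h
    simp [pvDigitsCont, h1]
    intro hc hd
    exact absurd hd (by simpa [hc] using h2)

lemma pvRun (u v : List Char) (hv : pvNotCont v = true) :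
    (pvContOk u = true ∧ pvDigitsCont (u ++ v) = v) ∨
    (pvContOk u = false ∧ ∃ s0 s', s0 ∈ u ∧ s0.isDigit = false ∧
      pvDigitsCont (u ++ v) = s0 :: (s' ++ v)) := by
  induction u using pvContOk.induct with
  | case1 =>
    exact Or.inl ⟨by simp [pvContOk], pvDigitsCont_stop v hv⟩
  | case2 c =>
    by_cases hc : c.isDigit
    · left
      refine ⟨by simp [pvContOk, hc], ?_⟩
      cases v with
      | nil => simp [pvDigitsCont, hc]
      | cons w ws =>
        simp only [List.singleton_append]
        rw [show pvDigitsCont (c :: w :: ws) = pvDigitsCont (w :: ws) by simp [pvDigitsCont, hc]]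
        exact pvDigitsCont_stop _ hv
    · right
      refine ⟨by simp [pvContOk, hc], c, [], by simp, by simp [hc], ?_⟩
      cases v with
      | nil => simp [pvDigitsCont, hc]
      | cons w ws =>
        have hw : w.isDigit = false := pvNotCont_head w ws hv
        simp [pvDigitsCont, hc, hw]
  | case3 c d r hc ih =>
    rcases ih with ⟨h1, h2⟩ | ⟨h1, s0, s', hs, hsd, h2⟩
    · left; constructor
      · simp [pvContOk, hc, h1]
      · simpa [pvDigitsCont, hc] using h2
    · right
      refine ⟨by simp [pvContOk, hc, h1], s0, s', List.mem_cons_of_mem _ hs, hsd, ?_⟩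
      simpa [pvDigitsCont, hc] using h2
  | case4 c d r hc ih =>
    by_cases hud : c = '_' ∧ d.isDigit
    · rcases ih with ⟨h1, h2⟩ | ⟨h1, s0, s', hs, hsd, h2⟩
      · left; constructor
        · simp [pvContOk, hc, hud.1, hud.2, h1]
        · rw [show (c :: d :: r) ++ v = c :: d :: (r ++ v) by simp]
          rw [show pvDigitsCont (c :: d :: (r ++ v)) = pvDigitsCont (r ++ v) by
            simp [pvDigitsCont, hc, hud]]
          exact h2
      · right
        refine ⟨by simp [pvContOk, hc, h1], s0, s',
          List.mem_cons_of_mem _ (List.mem_cons_of_mem _ hs), hsd, ?_⟩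
        rw [show (c :: d :: r) ++ v = c :: d :: (r ++ v) by simp]
        rw [show pvDigitsCont (c :: d :: (r ++ v)) = pvDigitsCont (r ++ v) by
          simp [pvDigitsCont, hc, hud]]
        exact h2
    · right
      refine ⟨?_, c, d :: r, by simp, by simp [hc], ?_⟩
      · simp [pvContOk, hc]
        intro h1 h2; exact absurd ⟨h1, h2⟩ hud
      · rw [show (c :: d :: r) ++ v = c :: d :: (r ++ v) by simp]
        simp [pvDigitsCont, hc, hud]

lemma pvContOk_decl (l : List Char) :
    pvContOk l = (l.isEmpty || ((l.getLastD '_').isDigit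
      && l.all (fun c => c.isDigit || c = '_')
      && (l.zip l.tail).all (fun p => !(p.1 = '_' : Bool) || p.2.isDigit))) := by
  induction l using pvContOk.induct with
  | case1 => simp [pvContOk]
  | case2 c => by_cases hc : c.isDigit <;> simp [pvContOk, List.getLastD, hc]
  | case3 c d r hc ih =>
    have hne : ¬(c = '_') := by intro h; subst h; simp at hc
    have hcu : decide (c = '_') = false := decide_eq_false hne
    simp [pvContOk, hc, ih, List.getLastD]
    cases r <;> simp [List.getLastD, hcu]
  | case4 c d r hc ih =>
    by_cases hud : c = '_' ∧ d.isDigit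
    · obtain ⟨h1, h2⟩ := hud
      subst h1
      have hdne : ¬(d = '_') := by intro h; subst h; simp at h2
      have hdu : decide (d = '_') = false := decide_eq_false hdne
      simp [pvContOk, hc, h2, ih]
      cases r with
      | nil => simp [List.getLastD, h2]
      | cons w ws => simp [List.getLastD, h2, hdu]
    · by_cases hc2 : c = '_'
      · have hd : d.isDigit = false := by
          cases h : d.isDigit
          · rfl
          · exact absurd ⟨hc2, h⟩ hud
        subst hc2
        simp [pvContOk, hc, hd]
      · have hcu : decide (c = '_') = false := decide_eq_false hc2
        simp [pvContOk, hc, hcu]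

lemma digitsB_eq (l : List Char) :
    digitsB l = (match l with | [] => false | c :: t => c.isDigit && pvContOk t) := by
  cases l with
  | nil => simp [digitsB]
  | cons c t =>
    show digitsB (c :: t) = (c.isDigit && pvContOk t)
    by_cases hc : c.isDigit
    · have hne : ¬(c = '_') := by intro h; subst h; simp at hc
      have hcu : decide (c = '_') = false := decide_eq_false hne
      rw [pvContOk_decl]
      cases t with
      | nil => simp [digitsB, List.getLastD, hc]
      | cons w ws => simp [digitsB, List.getLastD, hc, hcu]
    · simp [digitsB, hc]

lemma pvDigitsCont_full (t : List Char) : (pvDigitsCont t = []) ↔ pvContOk t = true := by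
  have := pvRun t [] (by simp [pvNotCont])
  rcases this with ⟨h1, h2⟩ | ⟨h1, s0, s', _, _, h2⟩
  · simp at h2; simp [h1, h2]
  · simp at h2; simp [h1, h2]

lemma digits_full (v : List Char) :
    (match pvDigits v with | some [] => true | _ => false) = digitsB v := by
  cases v with
  | nil => simp [pvDigits, digitsB]
  | cons c t =>
    rw [digitsB_eq]
    show _ = (c.isDigit && pvContOk t)
    by_cases hc : c.isDigit
    · simp only [pvDigits, hc, if_pos rfl]
      by_cases hf : pvDigitsCont t = []
      · simp [hf, hc, (pvDigitsCont_full t).mp hf]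
      · have : pvContOk t = false := by
          cases h : pvContOk t
          · rfl
          · exact absurd ((pvDigitsCont_full t).mpr h) hf
        cases hdc : pvDigitsCont t with
        | nil => exact absurd hdc hf
        | cons a b => simp [hdc, hc, this]
    · simp [pvDigits, hc]

def eTail (t : Char) : Option (List Char) → List Char
  | none => []
  | some r => t :: r

lemma splitFirst_spec (t : Char) (l : List Char) :
    t ∉ (splitFirst t l).1 ∧ l = (splitFirst t l).1 ++ eTail t (splitFirst t l).2 := by
  induction l with
  | nil => simp [splitFirst, eTail]
  | cons c cs ih =>
    by_cases hc : c = t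
    · simp [splitFirst, hc, eTail]
    · obtain ⟨ih1, ih2⟩ := ih
      simp only [splitFirst, if_neg hc]
      refine ⟨?_, by simpa using congrArg (fun x => c :: x) ih2⟩
      simp [List.mem_cons]
      exact ⟨fun h => hc h.symm, ih1⟩

lemma expOk_eTail (eo : Option (List Char)) : pvExpOk (eTail 'e' eo) = expB eo := by
  cases eo with
  | none => rfl
  | some ex =>
    rw [show pvExpOk (eTail 'e' (some ex))
        = (match pvDigits (signDrop ex) with | some [] => true | _ => false) from rfl]
    rw [digits_full]
    rfl

lemma expOk_head_ne (c : Char) (r : List Char) (h : ¬ c = 'e') : pvExpOk (c :: r) = false := by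
  rw [pvExpOk.eq_def]
  split
  · simp_all
  · simp_all
  · rfl

lemma notCont_head_ne (c : Char) (t : List Char) (h1 : c.isDigit = false) (h2 : ¬ c = '_') :
    pvNotCont (c :: t) = true := by
  cases t <;> simp [pvNotCont, h1, h2]

lemma notCont_E (eo : Option (List Char)) : pvNotCont (eTail 'e' eo) = true := by
  cases eo with
  | none => rfl
  | some ex => exact notCont_head_ne 'e' ex (by decide) (by decide)

lemma dotMatch_ne (x : Char) (xs ys : List Char) (h : ¬ x = '.') :
    (match x :: xs with
      | '.' :: r => (match pvDigits r with | some r' => r' | none => r)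
      | _ => ys) = ys := by
  split
  · simp_all
  · rfl

lemma digitsB_nil : digitsB [] = false := by simp [digitsB]

lemma digitsB_cons (c : Char) (t : List Char) : digitsB (c :: t) = (c.isDigit && pvContOk t) := by
  rw [digitsB_eq]

lemma pvDigits_cons_digit (c : Char) (t : List Char) (hc : c.isDigit = true) :
    pvDigits (c :: t) = some (pvDigitsCont t) := by simp [pvDigits, hc]

lemma pvDigits_cons_nondigit (c : Char) (t : List Char) (hc : c.isDigit = false) :
    pvDigits (c :: t) = none := by simp [pvDigits, hc]

lemma numB_bridge (cs : List Char) : pvNumberOk cs = numB cs := by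
  obtain ⟨hmE, hcs⟩ := splitFirst_spec 'e' cs
  rcases hsE : splitFirst 'e' cs with ⟨m, eo⟩
  rw [hsE] at hmE hcs
  simp only at hmE hcs
  have hnumB : numB cs = (mantB m && expB eo) := by simp [numB, hsE]
  rw [hnumB, hcs]
  clear hnumB hcs hsE
  obtain ⟨hipD, hm⟩ := splitFirst_spec '.' m
  rcases hsD : splitFirst '.' m with ⟨ip, fo⟩
  rw [hsD] at hipD hm
  simp only at hipD hm
  have hipE : 'e' ∉ ip := fun hx => hmE (by rw [hm]; exact List.mem_append_left _ hx)
  have hvE : pvNotCont (eTail 'e' eo) = true := notCont_E eo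
  cases fo with
  | none =>
    -- no dot: m = ip
    rw [show mantB m = digitsB ip from by simp [mantB, hsD]]
    rw [hm]
    rw [show eTail '.' none = ([] : List Char) from rfl, List.append_nil]
    cases ip with
    | nil =>
      rw [digitsB_nil]
      cases eo with
      | none => simp [eTail, pvNumberOk, pvDigits]
      | some ex => simp [eTail, pvNumberOk, pvDigits]
    | cons c t =>
      simp only [digitsB_cons]
      by_cases hc : c.isDigit
      · simp only [List.cons_append, pvNumberOk, pvDigits_cons_digit _ _ hc]
        rcases pvRun t (eTail 'e' eo) hvE with ⟨hok, heq⟩ | ⟨hok, s0, s', hs0, hs0d, heq⟩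
        · rw [heq]
          cases eo with
          | none => simp [eTail, pvExpOk, hc, hok, expB]
          | some ex =>
            rw [show eTail 'e' (some ex) = 'e' :: ex from rfl]
            rw [dotMatch_ne 'e' ex _ (by decide)]
            rw [show pvExpOk ('e' :: ex) = expB (some ex) from expOk_eTail (some ex)]
            simp [hc, hok]
        · have hs0dot : ¬ s0 = '.' := fun hx => hipD (by subst hx; exact List.mem_cons_of_mem _ hs0)
          have hs0e : ¬ s0 = 'e' := fun hx => hipE (by subst hx; exact List.mem_cons_of_mem _ hs0)
          rw [heq, dotMatch_ne s0 _ _ hs0dot, expOk_head_ne s0 _ hs0e]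
          simp [hc, hok]
      · have hc' : c.isDigit = false := by simpa using hc
        have hcdot : ¬ c = '.' := fun hx => hipD (by subst hx; exact List.mem_cons_self)
        simp only [List.cons_append, pvNumberOk, pvDigits_cons_nondigit _ _ hc']
        simp only [hc', Bool.false_and]
        split
        · simp_all
        · rfl
  | some fp =>
    have hfpE : 'e' ∉ fp := by
      intro hx
      exact hmE (by rw [hm]; exact List.mem_append_right _ (List.mem_cons_of_mem _ hx))
    rw [show mantB m = (if ip.isEmpty then digitsB fp else digitsB ip && (fp.isEmpty || digitsB fp)) from by
      simp [mantB, hsD]]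
    rw [hm]
    rw [show eTail '.' (some fp) = '.' :: fp from rfl]
    cases ip with
    | nil =>
      simp only [List.nil_append, List.cons_append, List.isEmpty_nil, if_pos rfl]
      simp only [pvNumberOk, pvDigits_cons_nondigit '.' _ (by decide)]
      cases fp with
      | nil =>
        rw [digitsB_nil]
        cases eo with
        | none => simp [eTail, pvDigits]
        | some ex => simp [eTail, pvDigits]
      | cons c2 t2 =>
        simp only [digitsB_cons, digitsB_nil]
        by_cases hc2 : c2.isDigit
        · simp only [List.cons_append, pvDigits_cons_digit _ _ hc2]
          rcases pvRun t2 (eTail 'e' eo) hvE with ⟨hok, heq⟩ | ⟨hok, s0, s', hs0, hs0d, heq⟩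
          · rw [heq]
            simp only [expOk_eTail]
            simp [hc2, hok]
          · have hs0e : ¬ s0 = 'e' := fun hx => hfpE (by subst hx; exact List.mem_cons_of_mem _ hs0)
            rw [heq]
            simp only [expOk_head_ne s0 _ hs0e]
            simp [hc2, hok]
        · have hc2' : c2.isDigit = false := by simpa using hc2
          simp only [List.cons_append, pvDigits_cons_nondigit _ _ hc2']
          simp [hc2']
    | cons c t =>
      rw [if_neg (show ¬((c :: t).isEmpty = true) by simp)]
      simp only [digitsB_cons]
      simp only [List.cons_append, List.append_assoc]
      by_cases hc : c.isDigit
      · simp only [List.cons_append, pvNumberOk, pvDigits_cons_digit _ _ hc]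
        have hv2 : pvNotCont ('.' :: (fp ++ eTail 'e' eo)) = true :=
          notCont_head_ne '.' _ (by decide) (by decide)
        rcases pvRun t ('.' :: (fp ++ eTail 'e' eo)) hv2 with ⟨hok, heq⟩ | ⟨hok, s0, s', hs0, hs0d, heq⟩
        · rw [heq]
          -- the dot branch fires on rest1 = '.' :: (fp ++ E)
          cases fp with
          | nil =>
            cases eo with
            | none => simp [eTail, pvDigits, pvExpOk, hc, hok, expB, digitsB]
            | some ex =>
              rw [show ([] : List Char) ++ eTail 'e' (some ex) = 'e' :: ex from rfl]
              rw [show (match '.' :: ('e' :: ex) with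
                  | '.' :: r => (match pvDigits r with | some r' => r' | none => r)
                  | _ => ('.' : Char) :: ('e' :: ex)) = 'e' :: ex from by
                simp only [pvDigits_cons_nondigit 'e' _ (by decide)]]
              rw [show pvExpOk ('e' :: ex) = expB (some ex) from expOk_eTail (some ex)]
              simp [hc, hok, digitsB]
          | cons c2 t2 =>
            simp only [digitsB_cons, digitsB_nil]
            by_cases hc2 : c2.isDigit
            · simp only [List.cons_append, pvDigits_cons_digit _ _ hc2]
              rcases pvRun t2 (eTail 'e' eo) hvE with ⟨hok2, heq2⟩ | ⟨hok2, s0, s', hs0, hs0d, heq2⟩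
              · rw [heq2]
                simp only [expOk_eTail]
                simp [hc, hok, hc2, hok2]
              · have hs0e : ¬ s0 = 'e' := fun hx => hfpE (by subst hx; exact List.mem_cons_of_mem _ hs0)
                rw [heq2]
                simp only [expOk_head_ne s0 _ hs0e]
                simp [hc, hok, hc2, hok2]
            · have hc2' : c2.isDigit = false := by simpa using hc2
              have hc2e : ¬ c2 = 'e' := fun hx => hfpE (by subst hx; exact List.mem_cons_self)
              simp only [List.cons_append, pvDigits_cons_nondigit _ _ hc2']
              rw [expOk_head_ne c2 _ hc2e]
              simp [hc2']
        · have hs0dot : ¬ s0 = '.' := fun hx => hipD (by subst hx; exact List.mem_cons_of_mem _ hs0)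
          have hs0e : ¬ s0 = 'e' := fun hx => hipE (by subst hx; exact List.mem_cons_of_mem _ hs0)
          rw [heq, dotMatch_ne s0 _ _ hs0dot, expOk_head_ne s0 _ hs0e]
          simp [hc, hok]
      · have hc' : c.isDigit = false := by simpa using hc
        have hcdot : ¬ c = '.' := fun hx => hipD (by subst hx; exact List.mem_cons_self)
        simp only [List.cons_append, pvNumberOk, pvDigits_cons_nondigit _ _ hc']
        simp only [hc', Bool.false_and]
        split
        · simp_all
        · rfl

lemma float_bridge (s : String) : isPyFloat s = isPyFloatB s := by
  unfold isPyFloat isPyFloatB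
  simp only [numB_bridge, signDrop]
  rfl

-- B's loops as filters
lemma surviveRow_filter (row : List String) (cands : List Int) :
    surviveRow row cands = cands.filter (fun i => isPyFloatB (row.getD i.toNat "")) := by
  induction cands with
  | nil => rfl
  | cons i is ih => rw [show surviveRow row (i :: is) = (if isPyFloatB (row.getD i.toNat "") then i :: surviveRow row is else surviveRow row is) from rfl, ih, List.filter_cons]

lemma runRows_filter (rows : List (List String)) (cands : List Int) :
    runRows rows cands
      = cands.filter (fun i => rows.all (fun row => isPyFloatB (row.getD i.toNat ""))) := by
  induction rows generalizing cands with
  | nil => simp [runRows]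
  | cons row rs ih =>
    rw [show runRows (row :: rs) cands = runRows rs (surviveRow row cands) from rfl]
    rw [surviveRow_filter, ih, List.filter_filter]
    apply List.filter_congr
    intro i _
    simp [Bool.and_comm]

lemma minRowLen_foldl (l : List (List String)) (a : Nat) :
    minRowLen l a = l.foldl (fun acc r => Nat.min acc r.length) a := by
  induction l generalizing a with
  | nil => rfl
  | cons r rs ih => simp [minRowLen, ih]

-- ===== VERDICT (by name: the statement is the Claim_ definition above) =====
theorem detect_numerical_attributes_spec : Claim_equal_detect_numerical_attributes := by
  intro attributes _
  unfold Spec_detect_numerical_attributes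
  rw [portA_eq]
  cases attributes with
  | nil => simp [pvMinLen, detect_numerical_attributes_alt]
  | cons r0 rest =>
    rw [show detect_numerical_attributes_alt (r0 :: rest)
        = runRows (r0 :: rest) ((List.range (minRowLen rest r0.length)).map Int.ofNat) from rfl]
    rw [runRows_filter, minRowLen_foldl]
    have hm : rest.foldl (fun a r => Nat.min a r.length) r0.length = pvMinLen (r0 :: rest) := rfl
    rw [hm, List.filter_map]
    apply congrArg
    apply List.filter_congr
    intro j _
    simp [Function.comp, float_bridge]
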